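-- pv_equiv track=rewrite | github.com/vihashini-18/c_d | src/audio/elevenlabs_tts.py | get_voice_recommendations
-- ===== SOURCE A (Python) =====
-- from typing import Dict, Any, Optional, List
--
-- def get_voice_recommendations(text: str) -> List[str]:
--     """
--     Get voice recommendations based on text content
--
--     Args:
--         text: Text to analyze
--
--     Returns:
--         List of recommended voices
--     """
--     text_lower = text.lower()
--
--     recommendations = []
--
--     # Medical/clinical content
--     if any(word in text_lower for word in ['doctor', 'medical', 'health', 'patient', 'treatment']):
--         recommendations.extend(['alloy', 'onyx'])  # Professional, clear voices
--
--     # Emergency content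
--     elif any(word in text_lower for word in ['emergency', 'urgent', 'immediate', 'critical']):
--         recommendations.extend(['echo', 'nova'])  # Authoritative voices
--
--     # Emotional support content
--     elif any(word in text_lower for word in ['comfort', 'support', 'care', 'help', 'understand']):
--         recommendations.extend(['shimmer', 'fable'])  # Warm, empathetic voices
--
--     # General content
--     else:
--         recommendations.extend(['alloy', 'echo', 'nova'])  # Versatile voices
--
--     return list(set(recommendations))  # Remove duplicates
-- ===== SOURCE B (Python) =====
-- from typing import Dict, Any, Optional, List
--
-- _KEYWORD_PRIORITY = {
--     'doctor': 0, 'medical': 0, 'health': 0, 'patient': 0, 'treatment': 0,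
--     'emergency': 1, 'urgent': 1, 'immediate': 1, 'critical': 1,
--     'comfort': 2, 'support': 2, 'care': 2, 'help': 2, 'understand': 2,
-- }
-- _VOICES = [['alloy', 'onyx'], ['echo', 'nova'], ['shimmer', 'fable'],
--            ['alloy', 'echo', 'nova']]
--
--
-- def get_voice_recommendations(text: str) -> List[str]:
--     t = text.lower()
--     best = 3  # default category
--     for kw, pri in _KEYWORD_PRIORITY.items():
--         if kw in t and pri < best:
--             best = pri
--     return list(set(_VOICES[best]))
-- ===== Notes on version B (the rewrite author's own statement) =====
-- stated objective: alternative
-- what changed: Replaces the ordered if/elif first-match over keyword groups by a single unconditional pass over a flat keyword-to-priority map that takes the minimum matched priority and indexes a voices table with it.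
import Mathlib
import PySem

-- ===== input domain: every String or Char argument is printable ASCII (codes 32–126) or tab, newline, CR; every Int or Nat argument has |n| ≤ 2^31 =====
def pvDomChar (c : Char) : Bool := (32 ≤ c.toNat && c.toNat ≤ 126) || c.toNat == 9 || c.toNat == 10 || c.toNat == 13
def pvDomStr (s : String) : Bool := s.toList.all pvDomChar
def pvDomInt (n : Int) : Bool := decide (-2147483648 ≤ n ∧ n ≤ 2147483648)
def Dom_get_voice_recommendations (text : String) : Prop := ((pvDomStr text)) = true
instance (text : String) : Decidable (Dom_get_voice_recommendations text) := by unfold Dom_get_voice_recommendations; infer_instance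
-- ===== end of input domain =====

-- B replaces A's ordered if/elif first-match over keyword groups by one unconditional
-- pass over a flat keyword→priority map taking the minimum matched priority, then
-- indexing a voices table; same return value (alternative decomposition, same cost).

-- ===== PORT A =====
def get_voice_recommendations (text : String) : List String :=
  let text_lower := PySem.Str.lower text
  let recommendations : List String := []
  let recommendations :=
    if ["doctor", "medical", "health", "patient", "treatment"].any
        (fun word => PySem.Str.isIn word text_lower) then
      recommendations ++ ["alloy", "onyx"]
    else if ["emergency", "urgent", "immediate", "critical"].any
        (fun word => PySem.Str.isIn word text_lower) then
      recommendations ++ ["echo", "nova"]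
    else if ["comfort", "support", "care", "help", "understand"].any
        (fun word => PySem.Str.isIn word text_lower) then
      recommendations ++ ["shimmer", "fable"]
    else
      recommendations ++ ["alloy", "echo", "nova"]
  PySem.Set.ofList recommendations  -- list(set(...)); outputs compared as a set

-- ===== PORT B =====
-- dict keyword → priority, in insertion order (B's result is order-independent)
def pvKeywordPriority : List (String × Int) :=
  [("doctor", 0), ("medical", 0), ("health", 0), ("patient", 0), ("treatment", 0),
   ("emergency", 1), ("urgent", 1), ("immediate", 1), ("critical", 1),
   ("comfort", 2), ("support", 2), ("care", 2), ("help", 2), ("understand", 2)]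

def pvVoices : List (List String) :=
  [["alloy", "onyx"], ["echo", "nova"], ["shimmer", "fable"],
   ["alloy", "echo", "nova"]]

def get_voice_recommendations_alt (text : String) : List String :=
  let t := PySem.Str.lower text
  let best : Int := pvKeywordPriority.foldl
    (fun best kp => if PySem.Str.isIn kp.1 t && decide (kp.2 < best) then kp.2 else best) 3
  PySem.Set.ofList ((PySem.List.pyGet? pvVoices best).getD [])

-- ===== PRECONDITION & SPEC =====
def Spec_get_voice_recommendations (text : String) (out : List String) : Prop := out = get_voice_recommendations_alt text
instance (text : String) (out : List String) : Decidable (Spec_get_voice_recommendations text out) := by unfold Spec_get_voice_recommendations; infer_instance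

-- ===== CLAIM (what is proved, stated in full; the proofs are below) =====
def Claim_equal_get_voice_recommendations : Prop := ∀ (text : String), Dom_get_voice_recommendations text → Spec_get_voice_recommendations text (get_voice_recommendations text)

-- ===== LEMMAS AND PROOFS =====

-- B's fold over a keyword group whose priority is the constant p: the minimum
-- drops to min p acc exactly when some keyword of the group matches.
theorem pv_fold_group (t : String) (p : Int) (g : List String) (acc : Int) :
    (g.map (fun k => (k, p))).foldl
      (fun best kp => if PySem.Str.isIn kp.1 t && decide (kp.2 < best) then kp.2 else best) acc
    = if g.any (fun k => PySem.Str.isIn k t) then min p acc else acc := by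
  induction g generalizing acc with
  | nil => simp
  | cons x xs ih =>
    simp only [List.map_cons, List.foldl_cons, List.any_cons, ih]
    rcases Bool.eq_false_or_eq_true (PySem.Str.isIn x t) with hx | hx <;>
    rcases Bool.eq_false_or_eq_true (xs.any fun k => PySem.Str.isIn k t) with hxs | hxs <;>
    simp only [hx, hxs, Bool.true_or, Bool.false_or, Bool.true_and, Bool.false_and, Bool.false_eq_true,
      Bool.true_eq_false, if_true, if_false, decide_eq_true_eq, min_def] <;> split_ifs <;> omega

-- ===== VERDICT (by name: the statement is the Claim_ definition above) =====
theorem get_voice_recommendations_spec : Claim_equal_get_voice_recommendations := by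
  intro text _
  unfold Spec_get_voice_recommendations get_voice_recommendations get_voice_recommendations_alt
  have hsplit : pvKeywordPriority =
      (["doctor", "medical", "health", "patient", "treatment"].map (fun k => (k, (0 : Int)))) ++
      (["emergency", "urgent", "immediate", "critical"].map (fun k => (k, (1 : Int)))) ++
      (["comfort", "support", "care", "help", "understand"].map (fun k => (k, (2 : Int)))) := rfl
  rw [hsplit]
  simp only [List.foldl_append, pv_fold_group]
  by_cases h1 : List.any ["doctor", "medical", "health", "patient", "treatment"]
      (fun k => PySem.Str.isIn k (PySem.Str.lower text)) = true <;>
  by_cases h2 : List.any ["emergency", "urgent", "immediate", "critical"]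
      (fun k => PySem.Str.isIn k (PySem.Str.lower text)) = true <;>
  by_cases h3 : List.any ["comfort", "support", "care", "help", "understand"]
      (fun k => PySem.Str.isIn k (PySem.Str.lower text)) = true <;>
  simp only [h1, h2, h3, if_true] <;> rfl
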